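-- pv_equiv track=rewrite | github.com/HIVDiversity/NGS_processing_pipeline | remove_bad_sequences.py | degen_remove
-- ===== SOURCE A (Python) =====
-- import collections
--
-- def degen_remove(d):
--     '''
--     :param d: (dict) dictionary of sequence names and DNA sequences)
--     :return: (dict) (dict) dictionary with sequences with degenerate bases removed
--     '''
--     badseq = ['M', 'R', 'W', 'S', 'Y', 'K', 'B', 'D', 'H', 'V', 'N']
--     degen = 0
--     n_d = collections.defaultdict(str)
--     bad_d = collections.defaultdict(str)
--     for name, seq in d.items():
--         found = False
--         for base in badseq:
--             if base in seq and found is False: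
--                 bad_d[name] = seq
--                 degen += 1
--                 found = True
--         if found is False:
--             n_d[name] = seq
--
--     return n_d, bad_d, degen
-- ===== SOURCE B (Python) =====
-- import collections
--
-- def degen_remove(d):
--     badset = set('MRWSYKBDHVN')
--     n_d = collections.defaultdict(str)
--     bad_d = collections.defaultdict(str)
--     degen = 0
--     for name, seq in d.items():
--         if any(c in badset for c in seq):
--             bad_d[name] = seq
--             degen += 1
--         else:
--             n_d[name] = seq
--     return n_d, bad_d, degen
-- ===== Notes on version B (the rewrite author's own statement) =====
-- stated objective: simpler
-- what changed: Instead of an inner loop over the 11 degenerate-base strings with a 'found' flag doing repeated substring searches, B classifies each sequence with one early-exiting character scan against a set of degenerate bases built once.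
import Mathlib
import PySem

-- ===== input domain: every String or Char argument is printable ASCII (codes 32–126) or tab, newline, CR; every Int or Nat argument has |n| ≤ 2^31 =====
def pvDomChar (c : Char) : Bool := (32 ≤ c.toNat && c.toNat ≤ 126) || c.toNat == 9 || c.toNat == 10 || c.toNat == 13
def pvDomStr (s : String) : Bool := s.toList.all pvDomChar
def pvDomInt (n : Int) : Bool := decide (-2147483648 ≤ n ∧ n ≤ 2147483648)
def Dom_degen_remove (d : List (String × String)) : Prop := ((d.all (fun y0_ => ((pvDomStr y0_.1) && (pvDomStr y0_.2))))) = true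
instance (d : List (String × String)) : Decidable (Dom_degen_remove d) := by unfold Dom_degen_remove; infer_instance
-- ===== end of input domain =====

-- B replaces A's inner loop over the 11 degenerate-base strings (with a 'found' flag and
-- repeated substring searches) by a single character scan against a set built once (objective: simpler).
-- ===== PORT A =====
-- A: for each (name, seq), scan the 11 degenerate-base strings with a 'found' flag.
def pvBadseqA : List String := ["M", "R", "W", "S", "Y", "K", "B", "D", "H", "V", "N"]

def pvInnerA (name seq : String)
    (st2 : PySem.Dict String String × Int × Bool) (base : String) :
    PySem.Dict String String × Int × Bool :=
  if PySem.Str.isIn base seq && !st2.2.2 then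
    (st2.1.insert name seq, st2.2.1 + 1, true)
  else st2

def pvStepA (st : PySem.Dict String String × PySem.Dict String String × Int)
    (p : String × String) :
    PySem.Dict String String × PySem.Dict String String × Int :=
  let inner := pvBadseqA.foldl (pvInnerA p.1 p.2) (st.2.1, st.2.2, false)
  if inner.2.2 then (st.1, inner.1, inner.2.1)
  else (st.1.insert p.1 p.2, inner.1, inner.2.1)

def degen_remove (d : List (String × String)) : (List (String × String)) × (List (String × String)) × Int :=
  let r := d.foldl pvStepA (PySem.Dict.empty, PySem.Dict.empty, 0)
  (r.1.items, r.2.1.items, r.2.2)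

-- ===== PORT B =====
-- B: build the set of degenerate bases once; classify each sequence by one character scan.
def pvBadset : PySem.Set Char := PySem.Set.ofList "MRWSYKBDHVN".toList

def pvStepB (st : PySem.Dict String String × PySem.Dict String String × Int)
    (p : String × String) :
    PySem.Dict String String × PySem.Dict String String × Int :=
  if p.2.toList.any (fun c => PySem.Set.contains pvBadset c) then
    (st.1, st.2.1.insert p.1 p.2, st.2.2 + 1)
  else
    (st.1.insert p.1 p.2, st.2.1, st.2.2)

def degen_remove_alt (d : List (String × String)) : (List (String × String)) × (List (String × String)) × Int :=
  let r := d.foldl pvStepB (PySem.Dict.empty, PySem.Dict.empty, 0)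
  (r.1.items, r.2.1.items, r.2.2)

-- ===== PRECONDITION & SPEC =====
def Spec_degen_remove (d : List (String × String)) (out : (List (String × String)) × (List (String × String)) × Int) : Prop := out = degen_remove_alt d
instance (d : List (String × String)) (out : (List (String × String)) × (List (String × String)) × Int) : Decidable (Spec_degen_remove d out) := by unfold Spec_degen_remove; infer_instance

-- ===== CLAIM (what is proved, stated in full; the proofs are below) =====
def Claim_equal_degen_remove : Prop := ∀ (d : List (String × String)), Dom_degen_remove d → Spec_degen_remove d (degen_remove d)

-- ===== LEMMAS AND PROOFS =====

theorem pvInfix_single (c : Char) (l : List Char) : [c] <:+: l ↔ c ∈ l := by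
  constructor
  · intro h; exact h.subset (List.mem_singleton_self c)
  · intro h
    obtain ⟨s, t, rfl⟩ := List.append_of_mem h
    exact ⟨s, t, by simp⟩

theorem pvSet_eq :
    pvBadset = ['M', 'R', 'W', 'S', 'Y', 'K', 'B', 'D', 'H', 'V', 'N'] := by decide

theorem pvCond_eq (s : String) :
    pvBadseqA.any (fun b => PySem.Str.isIn b s)
      = s.toList.any (fun c => PySem.Set.contains pvBadset c) := by
  rw [Bool.eq_iff_iff]
  simp only [List.any_eq_true, PySem.Str.isIn_iff_infix,
    PySem.Set.contains_eq_listContains, List.contains_eq_mem, decide_eq_true_eq,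
    pvSet_eq]
  constructor
  · rintro ⟨b, hb, hinf⟩
    have h : ∀ b ∈ pvBadseqA,
        ∃ c ∈ (['M', 'R', 'W', 'S', 'Y', 'K', 'B', 'D', 'H', 'V', 'N'] : List Char),
          b.toList = [c] := by
      intro b hb
      fin_cases hb <;> first | exact ⟨'M', by simp, rfl⟩ | exact ⟨'R', by simp, rfl⟩ | exact ⟨'W', by simp, rfl⟩ | exact ⟨'S', by simp, rfl⟩ | exact ⟨'Y', by simp, rfl⟩ | exact ⟨'K', by simp, rfl⟩ | exact ⟨'B', by simp, rfl⟩ | exact ⟨'D', by simp, rfl⟩ | exact ⟨'H', by simp, rfl⟩ | exact ⟨'V', by simp, rfl⟩ | exact ⟨'N', by simp, rfl⟩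
    obtain ⟨c, hc, hbc⟩ := h b hb
    rw [hbc] at hinf
    exact ⟨c, (pvInfix_single c s.toList).mp hinf, hc⟩
  · rintro ⟨c, hc, hmem⟩
    have h : ∀ c ∈ (['M', 'R', 'W', 'S', 'Y', 'K', 'B', 'D', 'H', 'V', 'N'] : List Char),
        ∃ b ∈ pvBadseqA, b.toList = [c] := by
      intro c hc
      fin_cases hc <;> first | exact ⟨"M", by simp [pvBadseqA], rfl⟩ | exact ⟨"R", by simp [pvBadseqA], rfl⟩ | exact ⟨"W", by simp [pvBadseqA], rfl⟩ | exact ⟨"S", by simp [pvBadseqA], rfl⟩ | exact ⟨"Y", by simp [pvBadseqA], rfl⟩ | exact ⟨"K", by simp [pvBadseqA], rfl⟩ | exact ⟨"B", by simp [pvBadseqA], rfl⟩ | exact ⟨"D", by simp [pvBadseqA], rfl⟩ | exact ⟨"H", by simp [pvBadseqA], rfl⟩ | exact ⟨"V", by simp [pvBadseqA], rfl⟩ | exact ⟨"N", by simp [pvBadseqA], rfl⟩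
    obtain ⟨b, hb, hbc⟩ := h c hmem
    exact ⟨b, hb, by rw [hbc]; exact (pvInfix_single c s.toList).mpr hc⟩

theorem pvInner_found_true (name seq : String) (bs : List String)
    (bd : PySem.Dict String String) (k : Int) :
    bs.foldl (pvInnerA name seq) (bd, k, true) = (bd, k, true) := by
  induction bs with
  | nil => rfl
  | cons b bs ih => simpa [pvInnerA] using ih

theorem pvInner_char (name seq : String) (bs : List String)
    (bd : PySem.Dict String String) (k : Int) :
    bs.foldl (pvInnerA name seq) (bd, k, false)
      = if bs.any (fun b => PySem.Str.isIn b seq)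
        then (bd.insert name seq, k + 1, true) else (bd, k, false) := by
  induction bs with
  | nil => rfl
  | cons b bs ih =>
    rw [List.foldl_cons, List.any_cons]
    cases h : PySem.Chars.isIn b.toList seq.toList
    · have hb : pvInnerA name seq (bd, k, false) b = (bd, k, false) := by
        simp [pvInnerA, h]
      rw [hb, ih]
      simp [h]
    · have hb : pvInnerA name seq (bd, k, false) b = (bd.insert name seq, k + 1, true) := by
        simp [pvInnerA, h]
      rw [hb, pvInner_found_true]
      simp [h]

theorem pvStep_eq : pvStepA = pvStepB := by
  funext st p
  unfold pvStepA pvStepB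
  rw [pvInner_char, pvCond_eq]
  cases h : p.2.toList.any (fun c => PySem.Set.contains pvBadset c)
  · simp
  · simp

-- ===== VERDICT (by name: the statement is the Claim_ definition above) =====
theorem degen_remove_spec : Claim_equal_degen_remove := by
  intro d _
  unfold Spec_degen_remove degen_remove degen_remove_alt
  rw [pvStep_eq]
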